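-- pv_equiv track=rewrite | github.com/oademarlima/apigovdados | Prova - Pesquisador Data Engineer - Especialista Integração/Q1_ingest_projeto/src/ckan_client.py | pick_best_package
-- ===== SOURCE A (Python) =====
-- from typing import Dict, Any, Optional, List
--
-- def pick_best_package(result: Dict[str, Any], query: str) -> Optional[Dict[str, Any]]:
--     items: List[Dict[str, Any]] = result.get("results", []) or []
--     if not items:
--         return None
--     wanted = query.lower()
--     def title_ok(title: str) -> bool:
--         t = (title or "").lower()
--         return all(w in t for w in ["acessos", "banda", "larga"])
--     ranked = sorted(
--         items,
--         key=lambda x: (title_ok(x.get("title", "")), x.get("metadata_modified", "")),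
--         reverse=True,
--     )
--     return ranked[0] if ranked else None
-- ===== SOURCE B (Python) =====
-- def pick_best_package(result, query):
--     items = result.get("results", []) or []
--     if not items:
--         return None
--     words = ("acessos", "banda", "larga")
--     def ok(x):
--         t = x.get("title", "").lower()
--         return all(w in t for w in words)
--     matches = [x for x in items if ok(x)]
--     pool = matches if matches else items
--     return max(pool, key=lambda x: x.get("metadata_modified", ""))
-- ===== Notes on version B (the rewrite author's own statement) =====
-- stated objective: simpler
-- what changed: Replaces the O(n log n) stable composite-key reverse sort (then take head) with a one-pass partition into title matches plus a single-key max over the chosen pool, relying on filter preserving order and max returning the first maximum to reproduce the stable tie-break.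
import Mathlib
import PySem

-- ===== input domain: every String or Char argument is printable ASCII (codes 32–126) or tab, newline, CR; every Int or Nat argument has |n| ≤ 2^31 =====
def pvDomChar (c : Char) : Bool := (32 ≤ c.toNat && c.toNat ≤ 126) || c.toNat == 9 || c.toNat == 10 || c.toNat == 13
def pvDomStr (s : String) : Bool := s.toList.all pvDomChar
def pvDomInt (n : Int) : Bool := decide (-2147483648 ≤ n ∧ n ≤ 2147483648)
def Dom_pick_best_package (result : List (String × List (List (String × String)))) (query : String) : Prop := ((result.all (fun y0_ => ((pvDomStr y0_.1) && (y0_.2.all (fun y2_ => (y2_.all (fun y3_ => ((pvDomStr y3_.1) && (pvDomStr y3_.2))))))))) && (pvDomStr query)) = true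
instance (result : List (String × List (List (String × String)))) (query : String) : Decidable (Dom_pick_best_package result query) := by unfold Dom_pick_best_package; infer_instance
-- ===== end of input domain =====

-- B replaces A's stable composite-key reverse sort + head by a filter into title matches and a
-- single-key running max over the chosen pool (objective: simpler, one pass instead of a sort).

-- ===== PORT A =====
-- `title_ok(x.get("title",""))` of A
def pvTitleOk (x : List (String × String)) : Bool :=
  let title := PySem.Dict.getD ⟨x⟩ "title" ""
  let t := PySem.Str.lower (if title = "" then "" else title)   -- `(title or "").lower()`
  PySem.Str.isIn "acessos" t && PySem.Str.isIn "banda" t && PySem.Str.isIn "larga" t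

def pick_best_package (result : List (String × List (List (String × String)))) (query : String) : Option (List (String × String)) :=
  let items0 := PySem.Dict.getD ⟨result⟩ "results" []
  let items := if items0 = [] then [] else items0            -- `… or []`
  if items = [] then none
  else
    let _wanted := PySem.Str.lower query
    let ranked := PySem.List.sorted2 items
      (fun x => pvTitleOk x)
      (fun x => PySem.Dict.getD ⟨x⟩ "metadata_modified" "") true
    match ranked with                                        -- `ranked[0] if ranked else None`
    | [] => none
    | r :: _ => some r

-- ===== PORT B =====
def pvOk (x : List (String × String)) : Bool :=
  (["acessos", "banda", "larga"] : List String).all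
    (fun w => PySem.Str.isIn w (PySem.Str.lower (PySem.Dict.getD ⟨x⟩ "title" "")))

def pick_best_package_alt (result : List (String × List (List (String × String)))) (query : String) : Option (List (String × String)) :=
  let items := PySem.Dict.getD ⟨result⟩ "results" []
  if items = [] then none
  else
    let matchList := items.filter pvOk
    let pool := if matchList = [] then items else matchList
    PySem.List.max? pool (fun x => PySem.Dict.getD ⟨x⟩ "metadata_modified" "")

-- ===== PRECONDITION & SPEC =====
def Spec_pick_best_package (result : List (String × List (List (String × String)))) (query : String) (out : Option (List (String × String))) : Prop := out = pick_best_package_alt result query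
instance (result : List (String × List (List (String × String)))) (query : String) (out : Option (List (String × String))) : Decidable (Spec_pick_best_package result query out) := by unfold Spec_pick_best_package; infer_instance

-- ===== CLAIM (what is proved, stated in full; the proofs are below) =====
def Claim_equal_pick_best_package : Prop := ∀ (result : List (String × List (List (String × String)))) (query : String), Dom_pick_best_package result query → Spec_pick_best_package result query (pick_best_package result query)

-- ===== LEMMAS AND PROOFS =====

-- running-max step with an explicit boolean comparison
def pvStep {α : Type} (lt : α → α → Bool) (m : Option α) (x : α) : Option α :=
  match m with
  | none => some x
  | some m => if lt m x then some x else some m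

theorem head?_insertBy {α : Type} (lt : α → α → Bool) (x : α) (acc : List α) :
    (PySem.List.insertBy (fun a b => lt b a) x acc).head? = pvStep lt acc.head? x := by
  cases acc with
  | nil => simp [PySem.List.insertBy, pvStep]
  | cons y ys =>
      rw [show PySem.List.insertBy (fun a b => lt b a) x (y :: ys)
            = if lt y x then x :: y :: ys else y :: PySem.List.insertBy (fun a b => lt b a) x ys from rfl]
      by_cases h : lt y x = true <;> simp [pvStep, h]

theorem head?_foldl_insertBy {α : Type} (lt : α → α → Bool) (xs : List α) (acc : List α) :
    (xs.foldl (fun a x => PySem.List.insertBy (fun a b => lt b a) x a) acc).head?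
      = xs.foldl (pvStep lt) acc.head? := by
  induction xs generalizing acc with
  | nil => rfl
  | cons x t ih => simp only [List.foldl]; rw [ih, head?_insertBy]

-- the strict lexicographic comparison sorted2 uses
def pvLexLt {α : Type} (k1 : α → Bool) (k2 : α → String) (a b : α) : Bool :=
  decide (k1 a < k1 b) || (!decide (k1 b < k1 a) && decide (k2 a < k2 b))

theorem head?_sorted2_rev {α : Type} (xs : List α) (k1 : α → Bool) (k2 : α → String) :
    (PySem.List.sorted2 xs k1 k2 true).head? = xs.foldl (pvStep (pvLexLt k1 k2)) none := by
  have h := head?_foldl_insertBy (pvLexLt k1 k2) xs []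
  simpa [PySem.List.sorted2, pvLexLt] using h

def pvStep2 {α : Type} (k2 : α → String) : Option α → α → Option α :=
  pvStep (fun a b => decide (k2 a < k2 b))

theorem max?_eq_foldl_pvStep2 {α : Type} (xs : List α) (k2 : α → String) :
    PySem.List.max? xs k2 = xs.foldl (pvStep2 k2) none := by
  unfold PySem.List.max?
  congr 1
  funext acc x
  cases acc <;> simp [pvStep2, pvStep]

-- once the accumulator is a title match, non-matches are ignored and the lex fold is the k2 fold over matches
theorem foldl_lex_of_true {α : Type} (k1 : α → Bool) (k2 : α → String) (xs : List α) :
    ∀ m : α, k1 m = true →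
      xs.foldl (pvStep (pvLexLt k1 k2)) (some m) = (xs.filter k1).foldl (pvStep2 k2) (some m) := by
  induction xs with
  | nil => intro m _; rfl
  | cons x t ih =>
      intro m hm
      by_cases hx : k1 x = true
      · have : pvStep (pvLexLt k1 k2) (some m) x = pvStep2 k2 (some m) x := by
          simp [pvStep, pvStep2, pvLexLt, hm, hx]
        simp only [List.foldl, List.filter, hx, this]
        obtain ⟨m', h2, hm'⟩ : ∃ m', pvStep2 k2 (some m) x = some m' ∧ k1 m' = true := by
          simp only [pvStep2, pvStep]
          split
          · exact ⟨x, rfl, hx⟩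
          · exact ⟨m, rfl, hm⟩
        rw [h2, ih m' hm']
      · have hxf : k1 x = false := Bool.eq_false_iff.mpr hx
        have hstep : pvStep (pvLexLt k1 k2) (some m) x = some m := by
          simp [pvStep, pvLexLt, hm, hxf, Bool.lt_iff]
        simp only [List.foldl, List.filter, hxf, hstep]
        exact ih m hm

-- master: the lex-max fold over xs equals the k2-max fold over the match pool (matches if any, else xs)
theorem foldl_lex_master {α : Type} (k1 : α → Bool) (k2 : α → String) (xs : List α) :
    ∀ acc : Option α, (∀ m, acc = some m → k1 m = false) →
      xs.foldl (pvStep (pvLexLt k1 k2)) acc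
        = if xs.filter k1 = [] then xs.foldl (pvStep2 k2) acc
          else (xs.filter k1).foldl (pvStep2 k2) none := by
  induction xs with
  | nil => intro acc _; simp
  | cons x t ih =>
      intro acc hacc
      by_cases hx : k1 x = true
      · have hstep : pvStep (pvLexLt k1 k2) acc x = some x := by
          cases acc with
          | none => rfl
          | some m => simp [pvStep, pvLexLt, hacc m rfl, hx, Bool.lt_iff]
        simp only [List.foldl, List.filter, hx, hstep]
        have hne : x :: t.filter k1 ≠ [] := by simp
        rw [foldl_lex_of_true k1 k2 t x hx]
        simp [hne, pvStep2, pvStep]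
      · have hxf : k1 x = false := Bool.eq_false_iff.mpr hx
        have hstep : pvStep (pvLexLt k1 k2) acc x = pvStep2 k2 acc x := by
          cases acc with
          | none => rfl
          | some m => simp [pvStep, pvStep2, pvLexLt, hacc m rfl, hxf]
        have hkeep : ∀ m, pvStep2 k2 acc x = some m → k1 m = false := by
          intro m h
          cases acc with
          | none => simp [pvStep2, pvStep] at h; simpa [← h] using hxf
          | some m0 =>
              simp [pvStep2, pvStep] at h
              split at h <;> simp_all [hacc m0 rfl]
        simp only [List.foldl, List.filter, hxf, hstep]
        exact ih (pvStep2 k2 acc x) hkeep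

-- ===== VERDICT (by name: the statement is the Claim_ definition above) =====
theorem pick_best_package_spec : Claim_equal_pick_best_package := by
  intro result query _
  unfold Spec_pick_best_package pick_best_package pick_best_package_alt
  set items := PySem.Dict.getD ⟨result⟩ "results" ([] : List (List (String × String))) with hitems
  have hor : (if items = [] then ([] : List (List (String × String))) else items) = items := by
    split <;> simp_all
  simp only [hor]
  by_cases h : items = []
  · simp [h]
  · simp only [if_neg h]
    have hok : pvOk = pvTitleOk := by
      funext x
      simp only [pvOk, pvTitleOk, List.all]
      split
      · next heq => simp [heq, Bool.and_assoc]
      · simp [Bool.and_assoc]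
    have hA : (PySem.List.sorted2 items (fun x => pvTitleOk x)
        (fun x => PySem.Dict.getD ⟨x⟩ "metadata_modified" "") true).head?
        = items.foldl (pvStep (pvLexLt (fun x => pvTitleOk x)
            (fun x => PySem.Dict.getD ⟨x⟩ "metadata_modified" ""))) none :=
      head?_sorted2_rev items _ _
    have hmaster := foldl_lex_master (fun x => pvTitleOk x)
      (fun x => PySem.Dict.getD ⟨x⟩ "metadata_modified" "") items none (by intro m h; cases h)
    have hhead : (match PySem.List.sorted2 items (fun x => pvTitleOk x)
        (fun x => PySem.Dict.getD ⟨x⟩ "metadata_modified" "") true with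
        | [] => (none : Option (List (String × String)))
        | r :: _ => some r)
        = (PySem.List.sorted2 items (fun x => pvTitleOk x)
            (fun x => PySem.Dict.getD ⟨x⟩ "metadata_modified" "") true).head? := by
      cases PySem.List.sorted2 items (fun x => pvTitleOk x)
        (fun x => PySem.Dict.getD ⟨x⟩ "metadata_modified" "") true <;> rfl
    rw [hhead, hA, hmaster, hok]
    by_cases hf : items.filter pvTitleOk = []
    · simp [hf, max?_eq_foldl_pvStep2]
    · simp [hf, max?_eq_foldl_pvStep2]
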